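-- pv_equiv track=rewrite | github.com/DaecheolMOON/TAR1 | scripts/cosine_kmer_network.py | build_labels_from_seqs
-- ===== SOURCE A (Python) =====
-- def build_labels_from_seqs(seqs):
--     """
--     Build row/column labels from sequences:
--     first 5 bases + running index, e.g. 'TATCT_01'.
--     """
--     labels = []
--     counter = {}
--     for s in seqs:
--         tag = s[:5] if len(s) >= 5 else s
--         cnt = counter.get(tag, 0) + 1
--         counter[tag] = cnt
--         labels.append(f"{tag}_{cnt:02d}")
--     return labels
-- ===== SOURCE B (Python) =====
-- def build_labels_from_seqs(seqs):
--     """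
--     Build row/column labels from sequences:
--     first 5 bases + running index, e.g. 'TATCT_01'.
--     """
--     tags = [s[:5] if len(s) >= 5 else s for s in seqs]
--     out = [""] * len(tags)
--     for tag in dict.fromkeys(tags):      # distinct tags, first-occurrence order
--         rank = 1
--         for j, t in enumerate(tags):
--             if t == tag:
--                 out[j] = f"{tag}_{rank:02d}"
--                 rank += 1
--     return out
-- ===== Notes on version B (the rewrite author's own statement) =====
-- stated objective: alternative
-- what changed: Replaces the single left-to-right pass with a running counter dict by a group-by scatter: iterate over the distinct tags, scan for each tag's occurrence positions, and write that group's ranked labels out-of-order into a pre-allocated output list.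
import Mathlib
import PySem

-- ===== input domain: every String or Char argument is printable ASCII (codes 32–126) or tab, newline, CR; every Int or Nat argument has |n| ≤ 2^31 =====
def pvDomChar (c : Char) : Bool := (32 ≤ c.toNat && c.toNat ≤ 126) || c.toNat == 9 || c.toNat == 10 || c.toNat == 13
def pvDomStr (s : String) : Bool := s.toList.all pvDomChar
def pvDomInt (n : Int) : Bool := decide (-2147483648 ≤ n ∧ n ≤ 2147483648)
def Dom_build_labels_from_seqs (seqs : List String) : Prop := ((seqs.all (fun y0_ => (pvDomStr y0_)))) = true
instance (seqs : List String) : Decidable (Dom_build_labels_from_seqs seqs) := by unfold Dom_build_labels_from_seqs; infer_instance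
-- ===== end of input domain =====

-- B replaces the single counter-dict pass by a group-by scatter over the distinct tags
-- (alternative traversal order, not faster); return values proved equal on all inputs.

-- ===== PORT A =====
-- shared label helpers: tag = s[:5] if len(s) >= 5 else s; f"{tag}_{cnt:02d}"
def pvTag (s : String) : String :=
  if 5 ≤ PySem.Str.len s then PySem.Str.slice s none (some 5) else s

def pvLbl (tag : String) (cnt : Int) : String :=
  PySem.Str.join "" [tag, "_", PySem.Str.zfill (PySem.Int.toStr cnt) 2]

def build_labels_from_seqs (seqs : List String) : List String :=
  (seqs.foldl
      (fun (st : List String × PySem.Dict String Int) s =>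
        let tag := pvTag s
        let cnt := st.2.getD tag 0 + 1
        (st.1 ++ [pvLbl tag cnt], st.2.insert tag cnt))
      ([], PySem.Dict.empty)).1

-- ===== PORT B =====
-- out = [""]*len(tags); dict.fromkeys order = PySem.List.dedup; out[j] = … is pySetD
-- (j comes from enumerate, so always in range; the "" placeholder is always overwritten).
def build_labels_from_seqs_alt (seqs : List String) : List String :=
  let tags := seqs.map pvTag
  let out0 := tags.map (fun _ => "")
  (PySem.List.dedup tags).foldl
    (fun out tag =>
      ((PySem.List.enumerate tags).foldl
          (fun (st : List String × Int) p =>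
            if p.2 == tag then (PySem.List.pySetD st.1 p.1 (pvLbl tag st.2), st.2 + 1) else st)
          (out, 1)).1)
    out0

-- ===== PRECONDITION & SPEC =====
def Spec_build_labels_from_seqs (seqs : List String) (out : List String) : Prop := out = build_labels_from_seqs_alt seqs
instance (seqs : List String) (out : List String) : Decidable (Spec_build_labels_from_seqs seqs out) := by unfold Spec_build_labels_from_seqs; infer_instance

-- ===== CLAIM =====
def Claim_equal_build_labels_from_seqs : Prop := ∀ (seqs : List String), Dom_build_labels_from_seqs seqs → Spec_build_labels_from_seqs seqs (build_labels_from_seqs seqs)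

-- ===== LEMMAS AND PROOFS =====

-- the common target: position j carries its tag with the count of that tag in tags[:j+1]
def pvSpecF (ts : List String) (j : Nat) : String :=
  match ts[j]? with
  | some t => pvLbl t (((ts.take (j+1)).count t : Int))
  | none => ""

-- ---- A side: fold with counter dict = recursive description pvMk = range-map of pvSpecF
def pvMk (done ts : List String) : List String :=
  match ts with
  | [] => []
  | t :: rest => pvLbl t ((done.count t : Int) + 1) :: pvMk (done ++ [t]) rest

def pvCounterOf (done : List String) : PySem.Dict String Int :=
  done.foldl (fun d x => d.insert x (d.getD x 0 + 1)) PySem.Dict.empty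

lemma pvCounterOf_getD (done : List String) (t : String) :
    (pvCounterOf done).getD t 0 = (done.count t : Int) := by
  simp [pvCounterOf, PySem.Dict.getD_foldl_insert_add_one]

lemma pvCounterOf_snoc (done : List String) (t : String) :
    pvCounterOf (done ++ [t]) = (pvCounterOf done).insert t ((pvCounterOf done).getD t 0 + 1) := by
  simp [pvCounterOf, List.foldl_append]

lemma A_fold_eq_mk (ss : List String) (L done : List String) :
    (ss.foldl
        (fun (st : List String × PySem.Dict String Int) s =>
          let tag := pvTag s
          let cnt := st.2.getD tag 0 + 1
          (st.1 ++ [pvLbl tag cnt], st.2.insert tag cnt))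
        (L, pvCounterOf done)).1
      = L ++ pvMk done (ss.map pvTag) := by
  induction ss generalizing L done with
  | nil => simp [pvMk]
  | cons s rest ih =>
      simp only [List.foldl_cons, List.map_cons, pvMk]
      rw [(pvCounterOf_snoc done (pvTag s)).symm, ih, pvCounterOf_getD]
      simp

lemma pvMk_eq_range (ts : List String) : ∀ (done : List String),
    pvMk done ts
      = (List.range ts.length).map (fun j =>
          match ts[j]? with
          | some t => pvLbl t ((((done ++ ts).take (done.length + j + 1)).count t : Int))
          | none => "") := by
  induction ts with
  | nil => intro done; simp [pvMk]
  | cons t rest ih =>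
      intro done
      simp only [pvMk, List.length_cons, List.range_succ_eq_map, List.map_cons, List.map_map]
      refine List.cons_eq_cons.mpr ⟨?_, ?_⟩
      · have h1 : (done ++ t :: rest).take (done.length + 0 + 1) = done ++ [t] := by
          rw [show done.length + 0 + 1 = done.length + 1 from rfl]
          rw [show done ++ t :: rest = (done ++ [t]) ++ rest by simp]
          rw [List.take_append_of_le_length (by simp)]
          simp
        simp [h1, List.count_append]
      · rw [ih (done ++ [t])]
        refine List.map_congr_left ?_
        intro j hj
        simp only [Function.comp]
        have e1 : (t :: rest)[j+1]? = rest[j]? := rfl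
        have e2 : done ++ t :: rest = (done ++ [t]) ++ rest := by simp
        have e3 : done.length + (j + 1) + 1 = (done ++ [t]).length + j + 1 := by
          simp; ring
        rw [e1, e2, e3]

-- ---- B side: the scatter loop, over a range-map state
-- inner loop over the suffix ts.drop k, rank r = count so far + 1
lemma inner_seg (ts : List String) (tag : String) :
    ∀ (us : List String) (k : Nat) (g : Nat → String) (r : Int),
    us = ts.drop k →
    r = ((ts.take k).count tag : Int) + 1 →
    ((PySem.List.enumerate us (k : Int)).foldl
        (fun (st : List String × Int) p =>
          if p.2 == tag then (PySem.List.pySetD st.1 p.1 (pvLbl tag st.2), st.2 + 1) else st)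
        ((List.range ts.length).map g, r)).1
      = (List.range ts.length).map (fun j =>
          if k ≤ j ∧ ts[j]? = some tag
          then pvLbl tag (((ts.take (j+1)).count tag : Int)) else g j) := by
  intro us
  induction us generalizing ts tag with
  | nil =>
      intro k g r hus hr
      have hk : ts.length ≤ k := by
        by_contra h
        have := List.drop_eq_nil_iff.mp hus.symm
        omega
      simp only [PySem.List.enumerate_nil, List.foldl_nil]
      refine List.map_congr_left ?_
      intro j hj
      rw [List.mem_range] at hj
      rw [if_neg]
      rintro ⟨h1, _⟩; omega
  | cons u us' ih =>
      intro k g r hus hr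
      have hk : k < ts.length := by
        by_contra h
        rw [List.drop_eq_nil_iff.mpr (by omega)] at hus
        simp at hus
      have hpair : u = ts[k] ∧ us' = ts.drop (k+1) := by
        rw [List.drop_eq_getElem_cons hk] at hus
        exact List.cons_eq_cons.mp hus
      have hu : u = ts[k] := hpair.1
      have hus' : us' = ts.drop (k+1) := hpair.2
      have htake : ts.take (k+1) = ts.take k ++ [ts[k]] := by
        rw [List.take_add_one]; simp [List.getElem?_eq_getElem hk]
      rw [PySem.List.enumerate_cons, List.foldl_cons]
      by_cases hEq : u = tag
      · rw [if_pos (by simpa using hEq)]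
        simp only
        have hck : ts[k] = tag := hu.symm.trans hEq
        have hset : PySem.List.pySetD ((List.range ts.length).map g) ((k : Nat) : Int) (pvLbl tag r)
            = (List.range ts.length).map (fun j => if j = k then pvLbl tag r else g j) := by
          rw [PySem.List.pySetD_natCast]
          apply List.ext_getElem
          · simp
          · intro i h1 h2
            simp only [List.getElem_set, List.getElem_map, List.getElem_range]
            by_cases h : k = i
            · rw [if_pos h, if_pos h.symm]
            · rw [if_neg h, if_neg (fun hh => h hh.symm)]
        have hcast : ((k : Nat) : Int) + 1 = (((k+1 : Nat)) : Int) := by push_cast; ring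
        have harg : r + 1 = ((ts.take (k+1)).count tag : Int) + 1 := by
          rw [hr, htake, List.count_append, hck]
          simp
          try push_cast
          try ring
          try omega
        rw [hset, hcast, ih ts tag (k+1) _ _ hus' harg]
        have hgk : ts[k]? = some tag := by rw [List.getElem?_eq_getElem hk, hck]
        have hrv : pvLbl tag r = pvLbl tag (((ts.take (k+1)).count tag : Int)) := by
          refine congrArg (pvLbl tag) ?_
          rw [hr, htake, List.count_append, hck]
          simp
          try push_cast
          try ring
          try omega
        refine List.map_congr_left ?_
        intro j hj
        rw [List.mem_range] at hj
        by_cases hjk : j = k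
        · have nC1 : ¬ (k + 1 ≤ j ∧ ts[j]? = some tag) := fun hh => by omega
          have C3 : k ≤ j ∧ ts[j]? = some tag := ⟨by omega, by rw [hjk]; exact hgk⟩
          rw [if_neg nC1, if_pos hjk, if_pos C3, hjk]
          exact hrv
        · by_cases hc : ts[j]? = some tag
          · by_cases hlt : k + 1 ≤ j
            · rw [if_pos ⟨hlt, hc⟩, if_pos ⟨by omega, hc⟩]
            · have nC1 : ¬ (k + 1 ≤ j ∧ ts[j]? = some tag) := fun hh => hlt hh.1
              have nC3 : ¬ (k ≤ j ∧ ts[j]? = some tag) := fun hh => absurd hh.1 (by omega)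
              rw [if_neg nC1, if_neg hjk, if_neg nC3]
          · have nC1 : ¬ (k + 1 ≤ j ∧ ts[j]? = some tag) := fun hh => hc hh.2
            have nC3 : ¬ (k ≤ j ∧ ts[j]? = some tag) := fun hh => hc hh.2
            rw [if_neg nC1, if_neg hjk, if_neg nC3]
      · rw [if_neg (by simpa using hEq)]
        have hcast : ((k : Nat) : Int) + 1 = (((k+1 : Nat)) : Int) := by push_cast; ring
        have hne : ¬ (ts[k] = tag) := fun h => hEq (hu.trans h)
        have harg : r = ((ts.take (k+1)).count tag : Int) + 1 := by
          rw [hr, htake, List.count_append]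
          simp [hne]
        rw [hcast, ih ts tag (k+1) g r hus' harg]
        have hgk : ¬ (ts[k]? = some tag) := by
          rw [List.getElem?_eq_getElem hk]
          exact fun h => hne (Option.some.inj h)
        refine List.map_congr_left ?_
        intro j hj
        rw [List.mem_range] at hj
        by_cases hjk : j = k
        · have nC1 : ¬ (k + 1 ≤ j ∧ ts[j]? = some tag) := fun hh => by omega
          have nC3 : ¬ (k ≤ j ∧ ts[j]? = some tag) := fun hh => hgk (hjk ▸ hh.2)
          rw [if_neg nC1, if_neg nC3]
        · by_cases hc : ts[j]? = some tag
          · by_cases hlt : k + 1 ≤ j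
            · rw [if_pos ⟨hlt, hc⟩, if_pos ⟨by omega, hc⟩]
            · have nC1 : ¬ (k + 1 ≤ j ∧ ts[j]? = some tag) := fun hh => hlt hh.1
              have nC3 : ¬ (k ≤ j ∧ ts[j]? = some tag) := fun hh => absurd hh.1 (by omega)
              rw [if_neg nC1, if_neg nC3]
          · have nC1 : ¬ (k + 1 ≤ j ∧ ts[j]? = some tag) := fun hh => hc hh.2
            have nC3 : ¬ (k ≤ j ∧ ts[j]? = some tag) := fun hh => hc hh.2
            rw [if_neg nC1, if_neg nC3]

lemma outer_fold (ts : List String) :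
    ∀ (D : List String) (g : Nat → String),
    D.foldl
        (fun out tag =>
          ((PySem.List.enumerate ts).foldl
              (fun (st : List String × Int) p =>
                if p.2 == tag then (PySem.List.pySetD st.1 p.1 (pvLbl tag st.2), st.2 + 1) else st)
              (out, 1)).1)
        ((List.range ts.length).map g)
      = (List.range ts.length).map (fun j =>
          if (∃ t ∈ D, ts[j]? = some t) then pvSpecF ts j else g j) := by
  intro D
  induction D with
  | nil =>
      intro g
      simp
  | cons t D' ih =>
      intro g
      rw [List.foldl_cons]
      have h0 : ((PySem.List.enumerate ts).foldl
          (fun (st : List String × Int) p =>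
            if p.2 == t then (PySem.List.pySetD st.1 p.1 (pvLbl t st.2), st.2 + 1) else st)
          ((List.range ts.length).map g, 1)).1
        = (List.range ts.length).map (fun j =>
            if 0 ≤ j ∧ ts[j]? = some t
            then pvLbl t (((ts.take (j+1)).count t : Int)) else g j) := by
        have := inner_seg ts t ts 0 g 1 (by simp) (by simp)
        simpa using this
      rw [h0, ih]
      refine List.map_congr_left ?_
      intro j hj
      by_cases hD : ∃ t' ∈ D', ts[j]? = some t'
      · rw [if_pos hD, if_pos (by obtain ⟨t', ht', h⟩ := hD; exact ⟨t', List.mem_cons_of_mem _ ht', h⟩)]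
      · rw [if_neg hD]
        by_cases hc : ts[j]? = some t
        · rw [if_pos ⟨Nat.zero_le _, hc⟩,
              if_pos ⟨t, List.mem_cons_self, hc⟩]
          simp [pvSpecF, hc]
        · rw [if_neg (by rintro ⟨_, h⟩; exact hc h),
              if_neg (by
                rintro ⟨t', ht', h⟩
                rcases List.mem_cons.mp ht' with h1 | h1
                · exact hc (h1 ▸ h)
                · exact hD ⟨t', h1, h⟩)]

-- ===== VERDICT =====
theorem build_labels_from_seqs_spec : Claim_equal_build_labels_from_seqs := by
  intro seqs _
  show build_labels_from_seqs seqs = build_labels_from_seqs_alt seqs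
  have hA : build_labels_from_seqs seqs
      = (List.range (seqs.map pvTag).length).map (pvSpecF (seqs.map pvTag)) := by
    have h1 := A_fold_eq_mk seqs [] []
    have h2 := pvMk_eq_range (seqs.map pvTag) []
    simp only [build_labels_from_seqs]
    rw [show (PySem.Dict.empty : PySem.Dict String Int) = pvCounterOf [] from rfl, h1, h2]
    simp [pvSpecF]
  have hB : build_labels_from_seqs_alt seqs
      = (List.range (seqs.map pvTag).length).map (pvSpecF (seqs.map pvTag)) := by
    simp only [build_labels_from_seqs_alt]
    have hout0 : (seqs.map pvTag).map (fun _ => "")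
        = (List.range (seqs.map pvTag).length).map (fun _ => "") := by
      apply List.ext_getElem <;> simp
    rw [hout0, outer_fold (seqs.map pvTag) (PySem.List.dedup (seqs.map pvTag)) (fun _ => "")]
    refine List.map_congr_left ?_
    intro j hj
    rw [List.mem_range] at hj
    have hmem : (seqs.map pvTag)[j] ∈ PySem.List.dedup (seqs.map pvTag) := by
      rw [PySem.List.mem_dedup]
      exact List.getElem_mem hj
    rw [if_pos ⟨(seqs.map pvTag)[j], hmem, List.getElem?_eq_getElem hj⟩]
  rw [hA, hB]
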